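-- pv_equiv track=rewrite | github.com/nemmiz/aoc2021 | python/15.py | find_lowest_risk
-- ===== SOURCE A (Python) =====
-- from heapq import heappush, heappop
--
-- def find_lowest_risk(risk_levels):
--     end = max(risk_levels.keys())
--     paths = [(0, (0, 0))]
--     visited = {(0, 0): 1}
--     while paths:
--         cost, last = heappop(paths)
--         if last == end:
--             return cost
--         if last in visited and cost >= visited[last]:
--             continue
--         visited[last] = cost
--         for adj in ((last[0], last[1]+1), (last[0]+1, last[1]),
--                     (last[0]-1, last[1]), (last[0], last[1]-1)):
--             if adj in risk_levels:
--                 heappush(paths, (cost+risk_levels[adj], adj))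
-- ===== SOURCE B (Python) =====
-- def find_lowest_risk(risk_levels):
--     end = max(risk_levels.keys())
--     dist = {(0, 0): 0}
--     unsettled = set(risk_levels.keys())
--     unsettled.add((0, 0))
--     while True:
--         best = None
--         for cell in unsettled:
--             c = dist.get(cell)
--             if c is not None and (best is None or (c, cell) < best):
--                 best = (c, cell)
--         if best is None:
--             return None
--         cost, cell = best
--         if cell == end:
--             return cost
--         unsettled.remove(cell)
--         x, y = cell
--         for adj in ((x, y + 1), (x + 1, y), (x - 1, y), (x, y - 1)):
--             if adj in risk_levels:
--                 nc = cost + risk_levels[adj]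
--                 if adj not in dist or nc < dist[adj]:
--                     dist[adj] = nc
-- ===== Notes on version B (the rewrite author's own statement) =====
-- stated objective: alternative
-- what changed: A runs Dijkstra with a lazy-deletion binary heap (heapq) of (cost, cell) entries plus a visited dict; B keeps no heap at all: a dict of tentative distances and an unsettled set, and each round picks the unsettled cell with the smallest (cost, cell) by a linear scan, settles it and relaxes its four in-grid neighbours.
-- outside the precondition, e.g. on find_lowest_risk({(0, 1): -5}): A returns -5, B returns -5
import Mathlib
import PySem

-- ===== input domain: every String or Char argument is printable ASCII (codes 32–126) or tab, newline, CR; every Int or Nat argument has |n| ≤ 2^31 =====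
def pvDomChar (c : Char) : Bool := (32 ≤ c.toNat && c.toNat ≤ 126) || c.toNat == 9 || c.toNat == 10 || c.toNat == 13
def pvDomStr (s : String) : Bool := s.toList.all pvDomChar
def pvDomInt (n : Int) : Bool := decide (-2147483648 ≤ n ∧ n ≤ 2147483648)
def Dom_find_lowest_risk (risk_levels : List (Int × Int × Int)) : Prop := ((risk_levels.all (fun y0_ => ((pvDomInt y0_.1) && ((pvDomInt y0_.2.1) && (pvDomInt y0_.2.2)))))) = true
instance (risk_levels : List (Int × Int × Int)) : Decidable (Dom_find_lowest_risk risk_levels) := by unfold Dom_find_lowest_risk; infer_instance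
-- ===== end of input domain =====

-- B replaces A's lazy-deletion heap Dijkstra by heap-free Dijkstra (dist dict + unsettled set,
-- argmin by linear scan); objective: alternative data structure, not claimed faster.

-- ---- shared decoding of Python primitives (used by both ports) ----
-- the dict[tuple[int,int], int] argument, rebuilt as Python's dict(...) does (later duplicate key wins)
def pvGrid (risk_levels : List (Int × Int × Int)) : PySem.Dict (Int × Int) Int :=
  risk_levels.foldl (fun d t => d.insert (t.1, t.2.1) t.2.2) PySem.Dict.empty

-- Python's '<' on (Int, Int) tuples: lexicographic
def pvCellLt (a b : Int × Int) : Bool := a.1 < b.1 || (a.1 == b.1 && a.2 < b.2)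
-- Python's '<' on (cost, cell) tuples: lexicographic, nested tuple compared lexicographically
def pvEntryLt (e f : Int × (Int × Int)) : Bool := e.1 < f.1 || (e.1 == f.1 && pvCellLt e.2 f.2)

-- Python's max(keys()): running maximum over a nonempty list ([] is the ValueError case, excluded by Pre_)
def pvMaxKey (k : Int × Int) (t : List (Int × Int)) : Int × Int :=
  t.foldl (fun acc x => if pvCellLt acc x then x else acc) k

-- ===== PORT A =====
-- heapq is modelled by its observable value semantics: the heap is the multiset of its entries,
-- heappop returns the minimum entry (Python tuple order) and removes one copy of it,
-- heappush appends.  This is exact for the values A computes.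
def pvPopMin (h : List (Int × (Int × Int))) : Option ((Int × (Int × Int)) × List (Int × (Int × Int))) :=
  match h with
  | [] => none
  | e :: t =>
    let m := t.foldl (fun acc x => if pvEntryLt x acc then x else acc) e
    some (m, (e :: t).erase m)

-- A's inner for-loop: heappush (cost+risk, adj) for every in-grid neighbour
def pvPushes (grid : PySem.Dict (Int × Int) Int) (cost : Int)
    (rest : List (Int × (Int × Int))) (nbrs : List (Int × Int)) : List (Int × (Int × Int)) :=
  nbrs.foldl (fun h adj => match grid.get? adj with
                           | some w => h ++ [(cost + w, adj)]
                           | none => h) rest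

-- the while-loop of A; fuel is only a totality guard (the proofs show it never runs out on Pre_ inputs)
def pvLoopA (grid : PySem.Dict (Int × Int) Int) (endc : Int × Int) :
    Nat → List (Int × (Int × Int)) → PySem.Dict (Int × Int) Int → Option Int
  | 0, _, _ => none
  | fuel + 1, paths, visited =>
    match pvPopMin paths with
    | none => none                                   -- while paths: falls through, implicit None
    | some ((cost, last), rest) =>
      if last = endc then some cost
      else if (match visited.get? last with | some d => decide (cost ≥ d) | none => false) then
        pvLoopA grid endc fuel rest visited          -- continue
      else
        pvLoopA grid endc fuel
          (pvPushes grid cost rest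
            [(last.1, last.2 + 1), (last.1 + 1, last.2), (last.1 - 1, last.2), (last.1, last.2 - 1)])
          (visited.insert last cost)

def find_lowest_risk (risk_levels : List (Int × Int × Int)) : Option Int :=
  let grid := pvGrid risk_levels
  match grid.keys with
  | [] => none                                       -- Python: max(()) raises ValueError (outside Pre_)
  | k :: t =>
    pvLoopA grid (pvMaxKey k t) (5 * risk_levels.length + 10)
      [((0 : Int), ((0 : Int), (0 : Int)))]
      (PySem.Dict.empty.insert ((0 : Int), (0 : Int)) 1)

-- ===== PORT B =====
-- one step of B's linear argmin scan: best = min((dist[c], c) for c in unsettled if c in dist)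
def pvScanStep (dist : PySem.Dict (Int × Int) Int)
    (best : Option (Int × (Int × Int))) (cell : Int × Int) : Option (Int × (Int × Int)) :=
  match dist.get? cell with
  | none => best
  | some c =>
    match best with
    | none => some (c, cell)
    | some b => if pvEntryLt (c, cell) b then some (c, cell) else best

def pvScan (dist : PySem.Dict (Int × Int) Int) (us : List (Int × Int)) : Option (Int × (Int × Int)) :=
  us.foldl (pvScanStep dist) none

-- B's inner for-loop: dist[adj] = min(dist.get(adj, inf), cost + risk) for every in-grid neighbour
def pvRelax (grid : PySem.Dict (Int × Int) Int) (cost : Int)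
    (dist : PySem.Dict (Int × Int) Int) (nbrs : List (Int × Int)) : PySem.Dict (Int × Int) Int :=
  nbrs.foldl (fun d adj => match grid.get? adj with
                           | some w =>
                             (match d.get? adj with
                              | none => d.insert adj (cost + w)
                              | some old => if cost + w < old then d.insert adj (cost + w) else d)
                           | none => d) dist

-- the while-loop of B; fuel is only a totality guard (each pass removes a cell from the set)
def pvLoopB (grid : PySem.Dict (Int × Int) Int) (endc : Int × Int) :
    Nat → PySem.Dict (Int × Int) Int → PySem.Set (Int × Int) → Option Int
  | 0, _, _ => none
  | fuel + 1, dist, unsettled =>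
    match pvScan dist unsettled with
    | none => none
    | some (cost, cell) =>
      if cell = endc then some cost
      else
        match PySem.Set.remove? unsettled cell with
        | none => none                               -- KeyError: unreachable, cell came from the scan
        | some us' =>
          pvLoopB grid endc fuel
            (pvRelax grid cost dist
              [(cell.1, cell.2 + 1), (cell.1 + 1, cell.2), (cell.1 - 1, cell.2), (cell.1, cell.2 - 1)])
            us'

def find_lowest_risk_alt (risk_levels : List (Int × Int × Int)) : Option Int :=
  let grid := pvGrid risk_levels
  match grid.keys with
  | [] => none                                       -- Python: max(()) raises ValueError (outside Pre_)
  | k :: t =>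
    pvLoopB grid (pvMaxKey k t) (risk_levels.length + 3)
      (PySem.Dict.empty.insert ((0 : Int), (0 : Int)) 0)
      (PySem.Set.add (PySem.Set.ofList (pvGrid risk_levels).keys) ((0 : Int), (0 : Int)))

-- ===== PRECONDITION & SPEC =====
-- Pre_ excludes the empty dict, on which both programs raise ValueError, and dicts that contain a
-- negative risk while some grid cell is adjacent to the start: there A can diverge (a reachable
-- negative cycle) and, where it does return, the value is an artefact of the heap discipline,
-- outside Dijkstra's nonnegative-weight contract.
def Pre_find_lowest_risk (risk_levels : List (Int × Int × Int)) : Prop :=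
  risk_levels ≠ [] ∧
  ((∀ t ∈ risk_levels, 0 ≤ t.2.2) ∨
   (∀ t ∈ risk_levels,
      ¬((t.1, t.2.1) = ((0 : Int), (1 : Int)) ∨ (t.1, t.2.1) = ((1 : Int), (0 : Int)) ∨
        (t.1, t.2.1) = ((-1 : Int), (0 : Int)) ∨ (t.1, t.2.1) = ((0 : Int), (-1 : Int)))))

instance (risk_levels : List (Int × Int × Int)) : Decidable (Pre_find_lowest_risk risk_levels) := by
  unfold Pre_find_lowest_risk; infer_instance

def pvWitness_find_lowest_risk : (List (Int × Int × Int)) :=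
  [(0, 1, 3), (1, 0, 1), (1, 1, 4)]

def Spec_find_lowest_risk (risk_levels : List (Int × Int × Int)) (out : Option Int) : Prop := out = find_lowest_risk_alt risk_levels
instance (risk_levels : List (Int × Int × Int)) (out : Option Int) : Decidable (Spec_find_lowest_risk risk_levels out) := by unfold Spec_find_lowest_risk; infer_instance

-- ===== CLAIM (what is proved, stated in full; the proofs are below) =====
def Claim_equal_find_lowest_risk : Prop := ∀ (risk_levels : List (Int × Int × Int)), Dom_find_lowest_risk risk_levels → Pre_find_lowest_risk risk_levels → Spec_find_lowest_risk risk_levels (find_lowest_risk risk_levels)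

-- ===== LEMMAS AND PROOFS =====

-- ---- the lexicographic order on heap entries ----
def pvELe (e f : Int × (Int × Int)) : Prop := pvEntryLt e f = true ∨ e = f

lemma pvEntryLt_iff (e f : Int × (Int × Int)) :
    pvEntryLt e f = true ↔
      (e.1 < f.1 ∨ (e.1 = f.1 ∧ (e.2.1 < f.2.1 ∨ (e.2.1 = f.2.1 ∧ e.2.2 < f.2.2)))) := by
  simp [pvEntryLt, pvCellLt]

lemma pvELe_iff (e f : Int × (Int × Int)) :
    pvELe e f ↔
      (e.1 < f.1 ∨ (e.1 = f.1 ∧ (e.2.1 < f.2.1 ∨ (e.2.1 = f.2.1 ∧ e.2.2 ≤ f.2.2)))) := by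
  obtain ⟨e1, e2, e3⟩ := e; obtain ⟨f1, f2, f3⟩ := f
  simp [pvELe, pvEntryLt_iff, Prod.ext_iff]
  omega

lemma pvELe_refl (e : Int × (Int × Int)) : pvELe e e := Or.inr rfl

lemma pvELe_trans {e f g : Int × (Int × Int)} (h1 : pvELe e f) (h2 : pvELe f g) : pvELe e g := by
  rw [pvELe_iff] at *; omega

lemma pvELe_antisymm {e f : Int × (Int × Int)} (h1 : pvELe e f) (h2 : pvELe f e) : e = f := by
  obtain ⟨e1, e2, e3⟩ := e; obtain ⟨f1, f2, f3⟩ := f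
  rw [pvELe_iff] at *; simp only [Prod.ext_iff]
  simp only at h1 h2; omega

lemma pvELe_total {e f : Int × (Int × Int)} (h : pvEntryLt e f = false) : pvELe f e := by
  have h2 : ¬ (e.1 < f.1 ∨ (e.1 = f.1 ∧ (e.2.1 < f.2.1 ∨ (e.2.1 = f.2.1 ∧ e.2.2 < f.2.2)))) := by
    rw [← pvEntryLt_iff]; simp [h]
  rw [pvELe_iff]; omega

lemma pvELe_of_lt {e f : Int × (Int × Int)} (h : pvEntryLt e f = true) : pvELe e f := Or.inl h

lemma pvELe_cost {e f : Int × (Int × Int)} (h : pvELe e f) : e.1 ≤ f.1 := by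
  rw [pvELe_iff] at h; omega

-- ---- pvPopMin returns the minimum entry and erases one copy of it ----
lemma pvFoldMin_spec : ∀ (t : List (Int × (Int × Int))) (e : Int × (Int × Int)),
    (t.foldl (fun acc x => if pvEntryLt x acc then x else acc) e) ∈ e :: t ∧
    ∀ x ∈ e :: t, pvELe (t.foldl (fun acc x => if pvEntryLt x acc then x else acc) e) x := by
  intro t
  induction t with
  | nil => intro e; constructor
           · simp
           · intro x hx; simp at hx; subst hx; exact pvELe_refl _
  | cons y t ih =>
    intro e
    simp only [List.foldl_cons]
    obtain ⟨ihm, ihle⟩ := ih (if pvEntryLt y e then y else e)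
    have haccmem : (if pvEntryLt y e then y else e) = y ∨ (if pvEntryLt y e then y else e) = e := by
      by_cases hye : pvEntryLt y e = true
      · left; rw [if_pos hye]
      · right; rw [if_neg hye]
    have hacc_e : pvELe (if pvEntryLt y e then y else e) e := by
      by_cases hye : pvEntryLt y e = true
      · rw [if_pos hye]; exact pvELe_of_lt hye
      · rw [if_neg hye]; exact pvELe_refl _
    have hacc_y : pvELe (if pvEntryLt y e then y else e) y := by
      by_cases hye : pvEntryLt y e = true
      · rw [if_pos hye]; exact pvELe_refl _
      · rw [if_neg hye]
        exact pvELe_total (Bool.not_eq_true _ ▸ hye)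
    constructor
    · rcases haccmem with h | h <;> rw [h] at ihm ⊢
      · exact List.mem_cons_of_mem _ ihm
      · rcases List.mem_cons.1 ihm with h2 | h2
        · rw [h2]; exact List.mem_cons_self
        · exact List.mem_cons_of_mem _ (List.mem_cons_of_mem _ h2)
    · intro x hx
      rcases List.mem_cons.1 hx with rfl | hx'
      · exact pvELe_trans (ihle _ List.mem_cons_self) hacc_e
      rcases List.mem_cons.1 hx' with rfl | hx''
      · exact pvELe_trans (ihle _ List.mem_cons_self) hacc_y
      · exact ihle _ (List.mem_cons_of_mem _ hx'')

lemma pvPopMin_spec {H : List (Int × (Int × Int))} {m : Int × (Int × Int)}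
    {rest : List (Int × (Int × Int))} (h : pvPopMin H = some (m, rest)) :
    m ∈ H ∧ rest = H.erase m ∧ ∀ e ∈ H, pvELe m e := by
  cases H with
  | nil => simp [pvPopMin] at h
  | cons e t =>
    simp only [pvPopMin, Option.some.injEq, Prod.mk.injEq] at h
    obtain ⟨rfl, rfl⟩ := h
    obtain ⟨hm, hle⟩ := pvFoldMin_spec t e
    exact ⟨hm, rfl, hle⟩

lemma pvPopMin_eq_none {H : List (Int × (Int × Int))} (h : pvPopMin H = none) : H = [] := by
  cases H with
  | nil => rfl
  | cons e t => simp [pvPopMin] at h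

-- ---- pvMC: the minimum heap cost recorded for one cell ----
def pvMCf (a : Int × Int) (o : Option Int) (e : Int × (Int × Int)) : Option Int :=
  if e.2 = a then some (match o with | none => e.1 | some y => min y e.1) else o

def pvMC (H : List (Int × (Int × Int))) (a : Int × Int) : Option Int :=
  H.foldl (pvMCf a) none

lemma pvMC_acc_isSome (a : Int × Int) :
    ∀ (H : List (Int × (Int × Int))) (acc : Option Int), acc.isSome →
      (H.foldl (pvMCf a) acc).isSome := by
  intro H
  induction H with
  | nil => intro acc h; simpa using h
  | cons e t ih =>
    intro acc h
    refine ih _ ?_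
    unfold pvMCf
    split
    · rfl
    · exact h

lemma pvMC_isSome_aux (a : Int × Int) :
    ∀ (H : List (Int × (Int × Int))) (acc : Option Int),
      (∃ e ∈ H, e.2 = a) → (H.foldl (pvMCf a) acc).isSome := by
  intro H
  induction H with
  | nil => intro acc h; simp at h
  | cons x t ih =>
    intro acc h
    obtain ⟨e, he, hcell⟩ := h
    rcases List.mem_cons.1 he with rfl | he'
    · refine pvMC_acc_isSome a t _ ?_
      simp [pvMCf, hcell]
    · exact ih _ ⟨e, he', hcell⟩

lemma pvMC_mem_aux (a : Int × Int) :
    ∀ (H : List (Int × (Int × Int))) (acc : Option Int) (c : Int),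
      H.foldl (pvMCf a) acc = some c → acc = some c ∨ (c, a) ∈ H := by
  intro H
  induction H with
  | nil => intro acc c h; simp at h; simp [h]
  | cons x t ih =>
    intro acc c h
    simp only [List.foldl_cons] at h
    rcases ih _ _ h with hacc | hmem
    · unfold pvMCf at hacc
      split at hacc
      · rename_i hcell
        cases hacc' : acc with
        | none =>
          rw [hacc'] at hacc; simp at hacc
          right
          exact List.mem_cons.2 (Or.inl (by rw [← hacc, ← hcell]))
        | some y =>
          rw [hacc'] at hacc; simp at hacc
          rcases min_choice y x.1 with hmin | hmin
          · rw [hmin] at hacc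
            subst hacc
            exact Or.inl rfl
          · rw [hmin] at hacc
            right
            exact List.mem_cons.2 (Or.inl (by rw [← hacc, ← hcell]))
      · left; exact hacc
    · right; exact List.mem_cons_of_mem _ hmem

lemma pvMC_le_aux (a : Int × Int) :
    ∀ (H : List (Int × (Int × Int))) (acc : Option Int) (c : Int),
      H.foldl (pvMCf a) acc = some c →
      (∀ y, acc = some y → c ≤ y) ∧ (∀ e ∈ H, e.2 = a → c ≤ e.1) := by
  intro H
  induction H with
  | nil =>
    intro acc c h; simp at h
    exact ⟨by intro y hy; rw [h] at hy; simp at hy; omega, by simp⟩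
  | cons x t ih =>
    intro acc c h
    simp only [List.foldl_cons] at h
    obtain ⟨ih1, ih2⟩ := ih _ _ h
    by_cases hcell : x.2 = a
    · cases hac : acc with
      | none =>
        have heq : pvMCf a acc x = some x.1 := by rw [hac]; simp [pvMCf, hcell]
        have hkey := ih1 _ heq
        constructor
        · intro y hy
          simp at hy
        · intro e he hce
          rcases List.mem_cons.1 he with rfl | he'
          · exact hkey
          · exact ih2 e he' hce
      | some z =>
        have heq : pvMCf a acc x = some (min z x.1) := by rw [hac]; simp [pvMCf, hcell]
        have hkey := ih1 _ heq
        constructor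
        · intro y hy
          injection hy with hy
          subst hy
          exact le_trans hkey (min_le_left _ _)
        · intro e he hce
          rcases List.mem_cons.1 he with rfl | he'
          · exact le_trans hkey (min_le_right _ _)
          · exact ih2 e he' hce
    · have hacc : pvMCf a acc x = acc := by simp [pvMCf, hcell]
      rw [hacc] at ih1
      refine ⟨ih1, ?_⟩
      intro e he hce
      rcases List.mem_cons.1 he with rfl | he'
      · exact absurd hce hcell
      · exact ih2 e he' hce

lemma pvMC_mem {H : List (Int × (Int × Int))} {a : Int × Int} {c : Int}
    (h : pvMC H a = some c) : (c, a) ∈ H := by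
  rcases pvMC_mem_aux a H none c h with h' | h'
  · simp at h'
  · exact h'

lemma pvMC_le {H : List (Int × (Int × Int))} {a : Int × Int} {c : Int}
    (h : pvMC H a = some c) : ∀ e ∈ H, e.2 = a → c ≤ e.1 :=
  (pvMC_le_aux a H none c h).2

lemma pvMC_isSome {H : List (Int × (Int × Int))} {e : Int × (Int × Int)}
    (he : e ∈ H) (hcell : e.2 = a) : ∃ c, pvMC H a = some c := by
  have := pvMC_isSome_aux a H none ⟨e, he, hcell⟩
  cases h : pvMC H a with
  | none => rw [pvMC] at h; rw [h] at this; simp at this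
  | some c => exact ⟨c, rfl⟩

lemma pvMC_erase_aux (a : Int × Int) {m : Int × (Int × Int)} (hm : m.2 ≠ a) :
    ∀ (H : List (Int × (Int × Int))) (acc : Option Int),
      (H.erase m).foldl (pvMCf a) acc = H.foldl (pvMCf a) acc := by
  intro H
  induction H with
  | nil => intro acc; rfl
  | cons x t ih =>
    intro acc
    rw [List.erase_cons]
    split
    · rename_i hxm
      have hx : x = m := by simpa using hxm
      simp only [List.foldl_cons]
      have : pvMCf a acc x = acc := by subst hx; simp [pvMCf, hm]
      rw [this]
    · simp only [List.foldl_cons]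
      exact ih _

lemma pvMC_erase {H : List (Int × (Int × Int))} {m : Int × (Int × Int)} {a : Int × Int}
    (hm : m.2 ≠ a) : pvMC (H.erase m) a = pvMC H a :=
  pvMC_erase_aux a hm H none

-- ---- cons equations for the two inner for-loops ----
lemma pvPushes_cons (grid : PySem.Dict (Int × Int) Int) (c : Int)
    (H0 : List (Int × (Int × Int))) (adj : Int × Int) (t : List (Int × Int)) :
    pvPushes grid c H0 (adj :: t)
      = pvPushes grid c (match grid.get? adj with
                         | some w => H0 ++ [(c + w, adj)]
                         | none => H0) t := rfl

lemma pvRelax_cons (grid : PySem.Dict (Int × Int) Int) (c : Int)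
    (d0 : PySem.Dict (Int × Int) Int) (adj : Int × Int) (t : List (Int × Int)) :
    pvRelax grid c d0 (adj :: t)
      = pvRelax grid c (match grid.get? adj with
                        | some w =>
                          (match d0.get? adj with
                           | none => d0.insert adj (c + w)
                           | some old => if c + w < old then d0.insert adj (c + w) else d0)
                        | none => d0) t := rfl

-- ---- correspondence of A's push loop with B's relax loop, per cell ----
lemma pv_push_relax (grid : PySem.Dict (Int × Int) Int) (c : Int) (a : Int × Int) :
    ∀ (ns : List (Int × Int)) (H0 : List (Int × (Int × Int))) (d0 : PySem.Dict (Int × Int) Int),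
      pvMC H0 a = d0.get? a →
      pvMC (pvPushes grid c H0 ns) a = (pvRelax grid c d0 ns).get? a := by
  intro ns
  induction ns with
  | nil => intro H0 d0 h; exact h
  | cons adj t ih =>
    intro H0 d0 h
    rw [pvPushes_cons, pvRelax_cons]
    cases hg : grid.get? adj with
    | none => exact ih H0 d0 h
    | some w =>
      refine ih _ _ ?_
      by_cases hadj : adj = a
      · subst hadj
        have hmc : pvMC (H0 ++ [(c + w, adj)]) adj
            = some (match pvMC H0 adj with | none => c + w | some y => min y (c + w)) := by
          rw [pvMC, List.foldl_append]
          simp [pvMCf, pvMC]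
        rw [hmc]
        cases hd : d0.get? adj with
        | none =>
          rw [h, hd]
          simp
        | some old =>
          rw [h, hd]
          simp only []
          split
          · rename_i hlt
            rw [PySem.Dict.get?_insert]
            simp
            omega
          · rename_i hge
            rw [hd]
            simp at hge ⊢
            omega
      · have hmc : pvMC (H0 ++ [(c + w, adj)]) a = pvMC H0 a := by
          rw [pvMC, List.foldl_append]
          simp [pvMCf, hadj, pvMC]
        rw [hmc, h]
        cases hd : d0.get? adj with
        | none =>
          simp only []
          rw [PySem.Dict.get?_insert_of_ne _ _ (fun hh => hadj hh.symm)]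
        | some old =>
          simp only []
          split
          · rw [PySem.Dict.get?_insert_of_ne _ _ (fun hh => hadj hh.symm)]
          · rfl

lemma pv_mem_pushes (grid : PySem.Dict (Int × Int) Int) (c : Int) :
    ∀ (ns : List (Int × Int)) (H0 : List (Int × (Int × Int))) (e : Int × (Int × Int)),
      e ∈ pvPushes grid c H0 ns →
      e ∈ H0 ∨ ∃ adj ∈ ns, ∃ w, grid.get? adj = some w ∧ e = (c + w, adj) := by
  intro ns
  induction ns with
  | nil => intro H0 e h; exact Or.inl h
  | cons adj t ih =>
    intro H0 e h
    rw [pvPushes_cons] at h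
    cases hg : grid.get? adj with
    | none =>
      rw [hg] at h
      rcases ih H0 e h with h' | ⟨adj', ha, w, hw, he⟩
      · exact Or.inl h'
      · exact Or.inr ⟨adj', List.mem_cons_of_mem _ ha, w, hw, he⟩
    | some w =>
      rw [hg] at h
      rcases ih _ e h with h' | ⟨adj', ha, w', hw, he⟩
      · rcases List.mem_append.1 h' with h'' | h''
        · exact Or.inl h''
        · simp at h''
          exact Or.inr ⟨adj, List.mem_cons_self, w, hg, h''⟩
      · exact Or.inr ⟨adj', List.mem_cons_of_mem _ ha, w', hw, he⟩

lemma pv_len_pushes (grid : PySem.Dict (Int × Int) Int) (c : Int) :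
    ∀ (ns : List (Int × Int)) (H0 : List (Int × (Int × Int))),
      (pvPushes grid c H0 ns).length ≤ H0.length + ns.length := by
  intro ns
  induction ns with
  | nil => intro H0; simp [pvPushes]
  | cons adj t ih =>
    intro H0
    rw [pvPushes_cons]
    cases hg : grid.get? adj with
    | none =>
      have := ih H0
      simp
      omega
    | some w =>
      have := ih (H0 ++ [(c + w, adj)])
      simp at this ⊢
      omega

-- ---- scan lemmas ----
lemma pvScan_none {dist : PySem.Dict (Int × Int) Int} :
    ∀ (us : List (Int × Int)), (∀ a ∈ us, dist.get? a = none) → pvScan dist us = none := by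
  have aux : ∀ (us : List (Int × Int)) acc, (∀ a ∈ us, dist.get? a = none) →
      us.foldl (pvScanStep dist) acc = acc := by
    intro us
    induction us with
    | nil => intro acc _; rfl
    | cons x t ih =>
      intro acc h
      rw [List.foldl_cons]
      have hx : dist.get? x = none := h x List.mem_cons_self
      have : pvScanStep dist acc x = acc := by simp [pvScanStep, hx]
      rw [this]
      exact ih _ (fun a ha => h a (List.mem_cons_of_mem _ ha))
  intro us h; exact aux us none h

lemma pvScan_mem_aux (dist : PySem.Dict (Int × Int) Int) :
    ∀ (us : List (Int × Int)) (acc : Option (Int × (Int × Int))) (p : Int × (Int × Int)),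
      us.foldl (pvScanStep dist) acc = some p →
      acc = some p ∨ (p.2 ∈ us ∧ dist.get? p.2 = some p.1) := by
  intro us
  induction us with
  | nil => intro acc p h; simp at h; simp [h]
  | cons x t ih =>
    intro acc p h
    rw [List.foldl_cons] at h
    rcases ih _ _ h with hacc | ⟨hm, hd⟩
    · unfold pvScanStep at hacc
      cases hg : dist.get? x with
      | none => rw [hg] at hacc; exact Or.inl hacc
      | some cx =>
        rw [hg] at hacc
        dsimp only at hacc
        cases acc with
        | none =>
          simp at hacc
          right
          refine ⟨?_, ?_⟩
          · rw [← hacc]; exact List.mem_cons_self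
          · rw [← hacc]; exact hg
        | some b =>
          dsimp only at hacc
          by_cases hlt : pvEntryLt (cx, x) b = true
          · rw [if_pos hlt] at hacc
            simp at hacc
            right
            refine ⟨?_, ?_⟩
            · rw [← hacc]; exact List.mem_cons_self
            · rw [← hacc]; exact hg
          · rw [if_neg hlt] at hacc
            exact Or.inl hacc
    · exact Or.inr ⟨List.mem_cons_of_mem _ hm, hd⟩

lemma pvScan_le_aux (dist : PySem.Dict (Int × Int) Int) :
    ∀ (us : List (Int × Int)) (acc : Option (Int × (Int × Int))) (p : Int × (Int × Int)),
      us.foldl (pvScanStep dist) acc = some p →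
      (∀ q, acc = some q → pvELe p q) ∧
      (∀ a ∈ us, ∀ ca, dist.get? a = some ca → pvELe p (ca, a)) := by
  intro us
  induction us with
  | nil =>
    intro acc p h; simp at h
    refine ⟨?_, by simp⟩
    intro q hq; rw [h] at hq; simp at hq; rw [hq]; exact pvELe_refl _
  | cons x t ih =>
    intro acc p h
    rw [List.foldl_cons] at h
    obtain ⟨ih1, ih2⟩ := ih _ _ h
    by_cases hg : (dist.get? x).isSome
    · obtain ⟨cx, hgx⟩ := Option.isSome_iff_exists.1 hg
      have hstep : ∀ q, acc = some q → pvELe p q := by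
        intro q hq
        subst hq
        have hs : pvScanStep dist (some q) x
            = if pvEntryLt (cx, x) q then some (cx, x) else some q := by
          simp [pvScanStep, hgx]
        rw [hs] at ih1
        split at ih1
        · rename_i hlt
          exact pvELe_trans (ih1 _ rfl) (pvELe_of_lt hlt)
        · exact ih1 _ rfl
      have hx : pvELe p (cx, x) := by
        cases hac : acc with
        | none =>
          have hs : pvScanStep dist none x = some (cx, x) := by simp [pvScanStep, hgx]
          rw [hac, hs] at ih1
          exact ih1 _ rfl
        | some b =>
          have hs : pvScanStep dist (some b) x
              = if pvEntryLt (cx, x) b then some (cx, x) else some b := by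
            simp [pvScanStep, hgx]
          rw [hac, hs] at ih1
          split at ih1
          · exact ih1 _ rfl
          · rename_i hnlt
            have hble : pvELe b (cx, x) := pvELe_total (by simpa using hnlt)
            exact pvELe_trans (hstep b hac) hble
      refine ⟨hstep, ?_⟩
      intro a ha ca hda
      rcases List.mem_cons.1 ha with rfl | ha'
      · rw [hgx] at hda; simp at hda; rw [← hda]; exact hx
      · exact ih2 a ha' ca hda
    · have hgx : dist.get? x = none := Option.not_isSome_iff_eq_none.1 hg
      have hs : pvScanStep dist acc x = acc := by simp [pvScanStep, hgx]
      rw [hs] at ih1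
      refine ⟨ih1, ?_⟩
      intro a ha ca hda
      rcases List.mem_cons.1 ha with rfl | ha'
      · rw [hgx] at hda; simp at hda
      · exact ih2 a ha' ca hda

lemma pvScan_acc_isSome (dist : PySem.Dict (Int × Int) Int) :
    ∀ (us : List (Int × Int)) (acc : Option (Int × (Int × Int))), acc.isSome →
      (us.foldl (pvScanStep dist) acc).isSome := by
  intro us
  induction us with
  | nil => intro acc h; simpa using h
  | cons x t ih =>
    intro acc h
    refine ih _ ?_
    unfold pvScanStep
    cases dist.get? x with
    | none => exact h
    | some cx =>
      cases acc with
      | none => rfl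
      | some b => dsimp only; split <;> rfl

lemma pvScan_isSome_aux (dist : PySem.Dict (Int × Int) Int) :
    ∀ (us : List (Int × Int)) (acc : Option (Int × (Int × Int))),
      ((∃ a ∈ us, (dist.get? a).isSome) ∨ acc.isSome) →
      (us.foldl (pvScanStep dist) acc).isSome := by
  intro us
  induction us with
  | nil =>
    intro acc h
    rcases h with ⟨a, ha, _⟩ | h
    · simp at ha
    · simpa using h
  | cons x t ih =>
    intro acc h
    rw [List.foldl_cons]
    rcases h with ⟨a, ha, hs⟩ | hs
    · rcases List.mem_cons.1 ha with rfl | ha'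
      · refine pvScan_acc_isSome dist t _ ?_
        obtain ⟨ca, hca⟩ := Option.isSome_iff_exists.1 hs
        unfold pvScanStep
        rw [hca]
        cases acc with
        | none => rfl
        | some b => dsimp only; split <;> rfl
      · exact ih _ (Or.inl ⟨a, ha', hs⟩)
    · refine pvScan_acc_isSome dist t _ ?_
      obtain ⟨b, hb⟩ := Option.isSome_iff_exists.1 hs
      subst hb
      unfold pvScanStep
      cases dist.get? x with
      | none => rfl
      | some cx => dsimp only; split <;> rfl

lemma pvScan_isSome {dist : PySem.Dict (Int × Int) Int} {us : List (Int × Int)}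
    {a : Int × Int} {c : Int} (ha : a ∈ us) (hd : dist.get? a = some c) :
    (pvScan dist us).isSome := by
  rw [pvScan]
  exact pvScan_isSome_aux dist us none (Or.inl ⟨a, ha, by rw [hd]; rfl⟩)

-- ---- grid decoding lemmas ----
lemma pvGrid_keys (rl : List (Int × Int × Int)) :
    (pvGrid rl).keys = PySem.Set.ofList (rl.map (fun t => (t.1, t.2.1))) := by
  rw [pvGrid, PySem.Dict.keys_foldl_insert_key rl (fun t => (t.1, t.2.1)) (fun _ t => t.2.2),
    PySem.Dict.keys_empty, PySem.Set.update_nil_left]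

lemma pvGrid_get?_mem {rl : List (Int × Int × Int)} {k : Int × Int} {v : Int}
    (h : (pvGrid rl).get? k = some v) : ∃ t ∈ rl, (t.1, t.2.1) = k ∧ t.2.2 = v := by
  have aux : ∀ (l : List (Int × Int × Int)) (d : PySem.Dict (Int × Int) Int),
      (l.foldl (fun d t => d.insert (t.1, t.2.1) t.2.2) d).get? k = some v →
      (∃ t ∈ l, (t.1, t.2.1) = k ∧ t.2.2 = v) ∨ d.get? k = some v := by
    intro l
    induction l with
    | nil => intro d h; exact Or.inr h
    | cons x t ih =>
      intro d h
      rw [List.foldl_cons] at h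
      rcases ih _ h with ⟨t', ht', hk, hv⟩ | h'
      · exact Or.inl ⟨t', List.mem_cons_of_mem _ ht', hk, hv⟩
      · rw [PySem.Dict.get?_insert] at h'
        split at h'
        · rename_i hk
          simp at h'
          exact Or.inl ⟨x, List.mem_cons_self, hk.symm, h'⟩
        · exact Or.inr h'
  rcases aux rl PySem.Dict.empty h with h' | h'
  · exact h'
  · rw [PySem.Dict.get?_empty] at h'; exact absurd h' (by simp)

lemma pv_len_discard {s : PySem.Set (Int × Int)} {v : Int × Int}
    (hnd : s.Nodup) (hv : v ∈ s) : (PySem.Set.discard s v).length = s.length - 1 := by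
  have hperm : (PySem.Set.discard s v).Perm (s.erase v) := by
    rw [List.perm_ext_iff_of_nodup (PySem.Set.nodup_discard s v hnd) (hnd.erase v)]
    intro a
    rw [PySem.Set.mem_discard, List.Nodup.mem_erase_iff hnd]
    tauto
  rw [hperm.length_eq, List.length_erase_of_mem hv]

lemma pvMaxKey_mem (k : Int × Int) (t : List (Int × Int)) : pvMaxKey k t ∈ k :: t := by
  have aux : ∀ (t : List (Int × Int)) (k : Int × Int),
      (t.foldl (fun acc x => if pvCellLt acc x then x else acc) k) ∈ k :: t := by
    intro t
    induction t with
    | nil => intro k; simp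
    | cons y t ih =>
      intro k
      rw [List.foldl_cons]
      have := ih (if pvCellLt k y then y else k)
      by_cases h : pvCellLt k y = true
      · rw [if_pos h] at this ⊢
        rcases List.mem_cons.1 this with h2 | h2
        · rw [h2]; simp
        · simp [h2]
      · rw [if_neg h] at this ⊢
        rcases List.mem_cons.1 this with h2 | h2
        · rw [h2]; simp
        · simp [h2]
  exact aux t k

-- ---- the simulation ----
lemma pv_sim (grid : PySem.Dict (Int × Int) Int) (endc : Int × Int)
    (WN : ∀ a w, grid.get? a = some w → 0 ≤ w) :
    ∀ (fa : Nat) (H : List (Int × (Int × Int))) (V : PySem.Dict (Int × Int) Int)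
      (fb : Nat) (dist : PySem.Dict (Int × Int) Int) (us : List (Int × Int)),
      us.Nodup →
      endc ∈ us →
      (∀ a ∈ us, V.get? a = none) →
      (∀ a, (a ∈ grid.keys ∨ a = ((0 : Int), (0 : Int))) → a ∉ us →
        ∃ ca, V.get? a = some ca ∧ ∀ e ∈ H, ca ≤ e.1) →
      (∀ a ∈ us, pvMC H a = dist.get? a) →
      (∀ e ∈ H, e.2 ∈ grid.keys ∨ e.2 = ((0 : Int), (0 : Int))) →
      H.length + 5 * us.length + 1 ≤ fa →
      us.length + 1 ≤ fb →
      pvLoopA grid endc fa H V = pvLoopB grid endc fb dist us := by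
  intro fa
  induction fa with
  | zero => intro H V fb dist us _ _ _ _ _ _ hfa _; omega
  | succ fa ih =>
    intro H V fb dist us hnd hend hS2 hS3 hS4 hS5 hfa hfb
    obtain ⟨fb', rfl⟩ : ∃ fb', fb = fb' + 1 := ⟨fb - 1, by omega⟩
    rw [pvLoopA]
    cases hpop : pvPopMin H with
    | none =>
      have hHnil := pvPopMin_eq_none hpop
      subst hHnil
      have hscan : pvScan dist us = none := pvScan_none us (fun a ha => by rw [← hS4 a ha]; rfl)
      rw [pvLoopB, hscan]
    | some pr =>
      obtain ⟨⟨c, v⟩, rest⟩ := pr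
      obtain ⟨hmem, hrest, hmin⟩ := pvPopMin_spec hpop
      dsimp only
      by_cases hv : v ∈ us
      · -- the popped entry is an unsettled cell: B selects exactly (c, v)
        obtain ⟨c', hc'⟩ := pvMC_isSome (a := v) hmem rfl
        have hdv : dist.get? v = some c := by
          have h1 : c' ≤ c := pvMC_le hc' (c, v) hmem rfl
          have h2 : c ≤ c' := pvELe_cost (hmin _ (pvMC_mem hc'))
          have hcc : c' = c := le_antisymm h1 h2
          rw [← hS4 v hv, hc', hcc]
        have hss := pvScan_isSome hv hdv
        obtain ⟨p, hp⟩ := Option.isSome_iff_exists.1 hss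
        have hp' : us.foldl (pvScanStep dist) none = some p := hp
        have hpcv : p = (c, v) := by
          rcases pvScan_mem_aux dist us none p hp' with h' | ⟨hpmem, hpd⟩
          · exact absurd h' (by simp)
          have hple := (pvScan_le_aux dist us none p hp').2
          have hmcp : pvMC H p.2 = some p.1 := by rw [hS4 p.2 hpmem]; exact hpd
          have hcv_le_p : pvELe (c, v) p := hmin _ (pvMC_mem hmcp)
          exact pvELe_antisymm (hple v hv c hdv) hcv_le_p
        subst hpcv
        rw [pvLoopB, hp]
        dsimp only
        by_cases hEnd : v = endc
        · rw [if_pos hEnd, if_pos hEnd]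
        · rw [if_neg hEnd, if_neg hEnd]
          have hskip : V.get? v = none := hS2 v hv
          rw [hskip]
          dsimp only
          rw [PySem.Set.remove?_of_mem hv]
          dsimp only
          -- apply the induction hypothesis to the expanded states
          have hvne : ∀ a ∈ PySem.Set.discard us v, a ≠ v :=
            fun a ha => ((PySem.Set.mem_discard us v a).1 ha).2
          have hmemus : ∀ a ∈ PySem.Set.discard us v, a ∈ us :=
            fun a ha => ((PySem.Set.mem_discard us v a).1 ha).1
          refine ih _ _ _ _ _ (PySem.Set.nodup_discard us v hnd) ?_ ?_ ?_ ?_ ?_ ?_ ?_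
          · exact (PySem.Set.mem_discard us v endc).2 ⟨hend, fun he => hEnd he.symm⟩
          · intro a ha
            rw [PySem.Dict.get?_insert, if_neg (hvne a ha)]
            exact hS2 a (hmemus a ha)
          · intro a hPa ha'
            by_cases hav : a = v
            · subst hav
              refine ⟨c, by rw [PySem.Dict.get?_insert, if_pos rfl], ?_⟩
              intro e he
              rcases pv_mem_pushes grid c _ _ _ he with herest | ⟨adj, _, w, hw, rfl⟩
              · exact pvELe_cost (hmin _ (List.mem_of_mem_erase (hrest ▸ herest)))
              · have := WN adj w hw; simp; omega
            · have hnotin : a ∉ us := fun hin =>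
                ha' ((PySem.Set.mem_discard us v a).2 ⟨hin, hav⟩)
              obtain ⟨ca, hca, hcale⟩ := hS3 a hPa hnotin
              refine ⟨ca, by rw [PySem.Dict.get?_insert, if_neg hav]; exact hca, ?_⟩
              intro e he
              rcases pv_mem_pushes grid c _ _ _ he with herest | ⟨adj, _, w, hw, rfl⟩
              · exact hcale _ (List.mem_of_mem_erase (hrest ▸ herest))
              · have h1 := WN adj w hw
                have h2 : ca ≤ c := hcale _ hmem
                simp; omega
          · intro a ha
            refine pv_push_relax grid c a _ _ _ ?_
            rw [hrest, pvMC_erase (show ((c, v) : Int × (Int × Int)).2 ≠ a from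
              fun h => (hvne a ha) (by rw [← h]))]
            exact hS4 a (hmemus a ha)
          · intro e he
            rcases pv_mem_pushes grid c _ _ _ he with herest | ⟨adj, _, w, hw, rfl⟩
            · exact hS5 _ (List.mem_of_mem_erase (hrest ▸ herest))
            · left
              exact (PySem.Dict.contains_iff_mem_keys grid adj).1
                (by rw [PySem.Dict.contains_eq_isSome_get?, hw]; rfl)
          · have hlen1 : (pvPushes grid c rest
                [(v.1, v.2 + 1), (v.1 + 1, v.2), (v.1 - 1, v.2), (v.1, v.2 - 1)]).length
                ≤ rest.length + 4 := pv_len_pushes grid c _ rest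
            have hlen2 : rest.length = H.length - 1 := by
              rw [hrest]; exact List.length_erase_of_mem hmem
            have hlen3 : (PySem.Set.discard us v).length = us.length - 1 := pv_len_discard hnd hv
            have hpos1 : 0 < H.length := List.length_pos_of_mem hmem
            have hpos2 : 0 < us.length := List.length_pos_of_mem hv
            omega
          · have hlen3 : (PySem.Set.discard us v).length = us.length - 1 := pv_len_discard hnd hv
            have hpos2 : 0 < us.length := List.length_pos_of_mem hv
            omega
      · -- stale entry for an already settled cell: A skips it, B does not move
        have hEnd : ¬ v = endc := fun h => hv (h ▸ hend)
        rw [if_neg hEnd]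
        have hPv : v ∈ grid.keys ∨ v = ((0 : Int), (0 : Int)) := hS5 _ hmem
        obtain ⟨cv, hcv, hcvle⟩ := hS3 v hPv hv
        have hge : cv ≤ c := hcvle _ hmem
        rw [hcv]
        dsimp only
        rw [if_pos (decide_eq_true (show c ≥ cv by omega))]
        refine ih _ _ _ _ _ hnd hend hS2 ?_ ?_ ?_ ?_ hfb
        · intro a hPa ha'
          obtain ⟨ca, hca, hcale⟩ := hS3 a hPa ha'
          exact ⟨ca, hca, fun e he => hcale _ (List.mem_of_mem_erase (hrest ▸ he))⟩
        · intro a ha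
          rw [hrest, pvMC_erase (show ((c, v) : Int × (Int × Int)).2 ≠ a from
            fun h => hv ((show v = a from h).symm ▸ ha))]
          exact hS4 a ha
        · intro e he
          exact hS5 _ (List.mem_of_mem_erase (hrest ▸ he))
        · have hpos1 : 0 < H.length := List.length_pos_of_mem hmem
          have hlen2 : rest.length = H.length - 1 := by
            rw [hrest]; exact List.length_erase_of_mem hmem
          omega

lemma pvLoopA_succ (grid : PySem.Dict (Int × Int) Int) (endc : Int × Int) (n : Nat)
    (paths : List (Int × (Int × Int))) (visited : PySem.Dict (Int × Int) Int) :
    pvLoopA grid endc (n + 1) paths visited =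
      match pvPopMin paths with
      | none => none
      | some ((cost, last), rest) =>
        if last = endc then some cost
        else if (match visited.get? last with | some d => decide (cost ≥ d) | none => false) then
          pvLoopA grid endc n rest visited
        else
          pvLoopA grid endc n
            (pvPushes grid cost rest
              [(last.1, last.2 + 1), (last.1 + 1, last.2), (last.1 - 1, last.2), (last.1, last.2 - 1)])
            (visited.insert last cost) := rfl

lemma pvLoopB_succ (grid : PySem.Dict (Int × Int) Int) (endc : Int × Int) (n : Nat)
    (dist : PySem.Dict (Int × Int) Int) (unsettled : PySem.Set (Int × Int)) :
    pvLoopB grid endc (n + 1) dist unsettled =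
      match pvScan dist unsettled with
      | none => none
      | some (cost, cell) =>
        if cell = endc then some cost
        else
          match PySem.Set.remove? unsettled cell with
          | none => none
          | some us' =>
            pvLoopB grid endc n
              (pvRelax grid cost dist
                [(cell.1, cell.2 + 1), (cell.1 + 1, cell.2), (cell.1 - 1, cell.2), (cell.1, cell.2 - 1)])
              us' := rfl

-- A's first iteration pops (0, (0,0)) and B's first scan selects it; afterwards the two loops
-- are related by pv_sim (nonnegative risks) or stop at once (no grid cell next to the start).
lemma pv_main (rl : List (Int × Int × Int)) (hpre : Pre_find_lowest_risk rl) :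
    find_lowest_risk rl = find_lowest_risk_alt rl := by
  obtain ⟨hne, hdisj⟩ := hpre
  unfold find_lowest_risk find_lowest_risk_alt
  dsimp only
  cases hk : (pvGrid rl).keys with
  | nil => rfl
  | cons k t =>
    dsimp only
    have h510 : 5 * rl.length + 10 = (5 * rl.length + 9) + 1 := by omega
    have h13 : rl.length + 3 = (rl.length + 2) + 1 := by omega
    rw [h510, h13, pvLoopA_succ, pvLoopB_succ]
    have hpop0 : pvPopMin [((0 : Int), ((0 : Int), (0 : Int)))]
        = some (((0 : Int), ((0 : Int), (0 : Int))), []) := rfl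
    rw [hpop0]
    have hd0 : (PySem.Dict.empty.insert ((0 : Int), (0 : Int)) (0 : Int)).get? ((0 : Int), (0 : Int))
        = some (0 : Int) := by rw [PySem.Dict.get?_insert, if_pos rfl]
    have hs0mem : ((0 : Int), (0 : Int))
        ∈ PySem.Set.add (PySem.Set.ofList (k :: t)) ((0 : Int), (0 : Int)) :=
      (PySem.Set.mem_add _ _ _).2 (Or.inr rfl)
    have hscan0 : pvScan (PySem.Dict.empty.insert ((0 : Int), (0 : Int)) (0 : Int))
        (PySem.Set.add (PySem.Set.ofList (k :: t)) ((0 : Int), (0 : Int)))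
        = some ((0 : Int), ((0 : Int), (0 : Int))) := by
      have hss := pvScan_isSome hs0mem hd0
      obtain ⟨p, hp⟩ := Option.isSome_iff_exists.1 hss
      rcases pvScan_mem_aux _ _ none p hp with h' | ⟨hpm, hpd⟩
      · exact absurd h' (by simp)
      have hp2 : p.2 = ((0 : Int), (0 : Int)) := by
        by_contra hne2
        rw [PySem.Dict.get?_insert, if_neg hne2, PySem.Dict.get?_empty] at hpd
        cases hpd
      have hp1 : p.1 = 0 := by
        rw [hp2, PySem.Dict.get?_insert, if_pos rfl] at hpd
        injection hpd with hpd
        omega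
      have hpe : p = ((0 : Int), ((0 : Int), (0 : Int))) := by
        rw [Prod.ext_iff]; exact ⟨hp1, hp2⟩
      rw [hp, hpe]
    rw [hscan0]
    dsimp only
    by_cases hse : ((0 : Int), (0 : Int)) = pvMaxKey k t
    · rw [if_pos hse, if_pos hse]
    · rw [if_neg hse, if_neg hse]
      rw [show (PySem.Dict.empty.insert ((0 : Int), (0 : Int)) (1 : Int)).get? ((0 : Int), (0 : Int))
          = some (1 : Int) from by rw [PySem.Dict.get?_insert, if_pos rfl]]
      dsimp only
      rw [if_neg (by decide)]
      rw [PySem.Set.remove?_of_mem hs0mem]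
      dsimp only
      have hnd0 : (PySem.Set.add (PySem.Set.ofList (k :: t)) ((0 : Int), (0 : Int))).Nodup :=
        PySem.Set.nodup_add _ _ (PySem.Set.nodup_ofList _)
      have hkeyslen : (k :: t).length ≤ rl.length := by
        have h1 := PySem.Set.length_ofList_le (rl.map (fun t => (t.1, t.2.1)))
        rw [List.length_map] at h1
        rw [← hk, pvGrid_keys]
        exact h1
      have hlen0 : (PySem.Set.add (PySem.Set.ofList (k :: t)) ((0 : Int), (0 : Int))).length
          ≤ rl.length + 1 := by
        have h2 := PySem.Set.length_ofList_le (k :: t)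
        have h3 : (PySem.Set.add (PySem.Set.ofList (k :: t)) ((0 : Int), (0 : Int))).length
            ≤ (PySem.Set.ofList (k :: t)).length + 1 := by
          rw [PySem.Set.add_eq_ite]
          split
          · omega
          · simp
        omega
      have hlen1 : (PySem.Set.discard
          (PySem.Set.add (PySem.Set.ofList (k :: t)) ((0 : Int), (0 : Int)))
          ((0 : Int), (0 : Int))).length
          = (PySem.Set.add (PySem.Set.ofList (k :: t)) ((0 : Int), (0 : Int))).length - 1 :=
        pv_len_discard hnd0 hs0mem
      rcases hdisj with hnonneg | hiso
      · -- nonnegative risks: hand over to the simulation lemma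
        refine pv_sim (pvGrid rl) (pvMaxKey k t) ?_ _ _ _ _ _ _
          (PySem.Set.nodup_discard _ _ hnd0) ?_ ?_ ?_ ?_ ?_ ?_ ?_
        · intro a w hw
          obtain ⟨t', ht', _, hv⟩ := pvGrid_get?_mem hw
          rw [← hv]
          exact hnonneg t' ht'
        · refine (PySem.Set.mem_discard _ _ _).2 ⟨?_, fun h => hse h.symm⟩
          exact (PySem.Set.mem_add _ _ _).2
            (Or.inl ((PySem.Set.mem_ofList _ _).2 (pvMaxKey_mem k t)))
        · intro a ha
          obtain ⟨ha1, ha2⟩ := (PySem.Set.mem_discard _ _ _).1 ha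
          rw [PySem.Dict.get?_insert, if_neg ha2, PySem.Dict.get?_insert, if_neg ha2,
            PySem.Dict.get?_empty]
        · intro a hPa ha'
          have hax : a = ((0 : Int), (0 : Int)) := by
            by_contra hax
            refine ha' ((PySem.Set.mem_discard _ _ _).2 ⟨?_, hax⟩)
            rcases hPa with h | h
            · rw [hk] at h
              exact (PySem.Set.mem_add _ _ _).2 (Or.inl ((PySem.Set.mem_ofList _ _).2 h))
            · exact absurd h hax
          subst hax
          refine ⟨0, by rw [PySem.Dict.get?_insert, if_pos rfl], ?_⟩
          intro e he
          rcases pv_mem_pushes _ _ _ _ _ he with h0 | ⟨adj, _, w, hw, rfl⟩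
          · simp at h0
          · have h1 : 0 ≤ w := by
              obtain ⟨t', ht', _, hv⟩ := pvGrid_get?_mem hw
              rw [← hv]; exact hnonneg t' ht'
            simp
            omega
        · intro a ha
          obtain ⟨ha1, ha2⟩ := (PySem.Set.mem_discard _ _ _).1 ha
          refine pv_push_relax _ _ _ _ _ _ ?_
          rw [PySem.Dict.get?_insert, if_neg ha2, PySem.Dict.get?_empty]
          rfl
        · intro e he
          rcases pv_mem_pushes _ _ _ _ _ he with h0 | ⟨adj, _, w, hw, rfl⟩
          · simp at h0
          · left
            exact (PySem.Dict.contains_iff_mem_keys _ adj).1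
              (by rw [PySem.Dict.contains_eq_isSome_get?, hw]; rfl)
        · have h4 := pv_len_pushes (pvGrid rl) 0
            [(((0 : Int), (0 : Int)).1, ((0 : Int), (0 : Int)).2 + 1),
             (((0 : Int), (0 : Int)).1 + 1, ((0 : Int), (0 : Int)).2),
             (((0 : Int), (0 : Int)).1 - 1, ((0 : Int), (0 : Int)).2),
             (((0 : Int), (0 : Int)).1, ((0 : Int), (0 : Int)).2 - 1)] []
          simp only [List.length_nil, List.length_cons] at h4
          omega
        · omega
      · -- no grid cell borders the start: both sides stop with None at once
        have hnb : ∀ adj : Int × Int,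
            (adj = ((0 : Int), (1 : Int)) ∨ adj = ((1 : Int), (0 : Int)) ∨
             adj = ((-1 : Int), (0 : Int)) ∨ adj = ((0 : Int), (-1 : Int))) →
            (pvGrid rl).get? adj = none := by
          intro adj hadj
          cases hg : (pvGrid rl).get? adj with
          | none => rfl
          | some w =>
            exfalso
            obtain ⟨t', ht', hkey, _⟩ := pvGrid_get?_mem hg
            exact hiso t' ht' (by rw [hkey]; exact hadj)
        have hn1 := hnb ((0 : Int), (1 : Int)) (Or.inl rfl)
        have hn2 := hnb ((1 : Int), (0 : Int)) (Or.inr (Or.inl rfl))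
        have hn3 := hnb ((-1 : Int), (0 : Int)) (Or.inr (Or.inr (Or.inl rfl)))
        have hn4 := hnb ((0 : Int), (-1 : Int)) (Or.inr (Or.inr (Or.inr rfl)))
        have hpush0 : pvPushes (pvGrid rl) 0 []
            [(((0 : Int), (0 : Int)).1, ((0 : Int), (0 : Int)).2 + 1),
             (((0 : Int), (0 : Int)).1 + 1, ((0 : Int), (0 : Int)).2),
             (((0 : Int), (0 : Int)).1 - 1, ((0 : Int), (0 : Int)).2),
             (((0 : Int), (0 : Int)).1, ((0 : Int), (0 : Int)).2 - 1)] = [] := by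
          have e1 : (((0 : Int), (0 : Int)).1, ((0 : Int), (0 : Int)).2 + 1)
              = ((0 : Int), (1 : Int)) := by norm_num
          have e2 : (((0 : Int), (0 : Int)).1 + 1, ((0 : Int), (0 : Int)).2)
              = ((1 : Int), (0 : Int)) := by norm_num
          have e3 : (((0 : Int), (0 : Int)).1 - 1, ((0 : Int), (0 : Int)).2)
              = ((-1 : Int), (0 : Int)) := by norm_num
          have e4 : (((0 : Int), (0 : Int)).1, ((0 : Int), (0 : Int)).2 - 1)
              = ((0 : Int), (-1 : Int)) := by norm_num
          rw [e1, e2, e3, e4, pvPushes_cons]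
          rw [hn1]
          rw [pvPushes_cons, hn2, pvPushes_cons, hn3, pvPushes_cons, hn4]
          rfl
        have hrelax0 : pvRelax (pvGrid rl) 0 (PySem.Dict.empty.insert ((0 : Int), (0 : Int)) (0 : Int))
            [(((0 : Int), (0 : Int)).1, ((0 : Int), (0 : Int)).2 + 1),
             (((0 : Int), (0 : Int)).1 + 1, ((0 : Int), (0 : Int)).2),
             (((0 : Int), (0 : Int)).1 - 1, ((0 : Int), (0 : Int)).2),
             (((0 : Int), (0 : Int)).1, ((0 : Int), (0 : Int)).2 - 1)]
            = PySem.Dict.empty.insert ((0 : Int), (0 : Int)) (0 : Int) := by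
          have e1 : (((0 : Int), (0 : Int)).1, ((0 : Int), (0 : Int)).2 + 1)
              = ((0 : Int), (1 : Int)) := by norm_num
          have e2 : (((0 : Int), (0 : Int)).1 + 1, ((0 : Int), (0 : Int)).2)
              = ((1 : Int), (0 : Int)) := by norm_num
          have e3 : (((0 : Int), (0 : Int)).1 - 1, ((0 : Int), (0 : Int)).2)
              = ((-1 : Int), (0 : Int)) := by norm_num
          have e4 : (((0 : Int), (0 : Int)).1, ((0 : Int), (0 : Int)).2 - 1)
              = ((0 : Int), (-1 : Int)) := by norm_num
          rw [e1, e2, e3, e4, pvRelax_cons, hn1, pvRelax_cons, hn2, pvRelax_cons, hn3,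
            pvRelax_cons, hn4]
          rfl
        rw [hpush0, hrelax0]
        rw [show 5 * rl.length + 9 = (5 * rl.length + 8) + 1 from by omega, pvLoopA_succ]
        rw [show rl.length + 2 = (rl.length + 1) + 1 from by omega, pvLoopB_succ]
        have hscannil : pvScan (PySem.Dict.empty.insert ((0 : Int), (0 : Int)) (0 : Int))
            (PySem.Set.discard (PySem.Set.add (PySem.Set.ofList (k :: t)) ((0 : Int), (0 : Int)))
              ((0 : Int), (0 : Int))) = none := by
          refine pvScan_none _ ?_
          intro a ha
          obtain ⟨ha1, ha2⟩ := (PySem.Set.mem_discard _ _ _).1 ha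
          rw [PySem.Dict.get?_insert, if_neg ha2, PySem.Dict.get?_empty]
        rw [hscannil]
        rfl

-- ===== VERDICT (by name: the statement is the Claim_ definition above) =====
theorem find_lowest_risk_spec : Claim_equal_find_lowest_risk := by
  intro rl _ hpre
  unfold Spec_find_lowest_risk
  exact pv_main rl hpre
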